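-- pv_equiv track=rewrite | github.com/FuqingZh/axiomkit | py/src/axiomkit/io/xlsx_formatter.py | _iter_vertical_runs
-- ===== SOURCE A (Python) =====
-- from collections.abc import Sequence
--
-- def _iter_vertical_runs(
--     header_grid: Sequence[Sequence[str]],
-- ):
--     """
--     Yield vertical runs (length > 1) of identical, non-empty cells.
--
--     Emits tuples (col_idx, row_start, row_end, value).
--     """
--     if not header_grid:
--         return
--
--     n_rows = len(header_grid)
--     n_cols = len(header_grid[0])
--
--     for _col_idx in range(n_cols):
--         n_row_idx_start_ = 0
--         while n_row_idx_start_ < n_rows: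
--             c_val_cell_current_ = header_grid[n_row_idx_start_][_col_idx]
--             if not c_val_cell_current_:
--                 n_row_idx_start_ += 1
--                 continue
--
--             n_row_idx_next_ = n_row_idx_start_ + 1
--
--             # is continuing run
--             while (
--                 n_row_idx_next_ < n_rows
--                 and header_grid[n_row_idx_next_][_col_idx] == c_val_cell_current_
--             ):
--                 n_row_idx_next_ += 1
--
--             n_len_vertical_run = n_row_idx_next_ - n_row_idx_start_
--             if n_len_vertical_run > 1:
--                 yield (
--                     _col_idx,
--                     n_row_idx_start_,
--                     n_row_idx_next_ - 1,
--                     c_val_cell_current_,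
--                 )
--
--             n_row_idx_start_ = n_row_idx_next_
-- ===== SOURCE B (Python) =====
-- def _iter_vertical_runs(header_grid):
--     """Yield vertical runs (length > 1) of identical, non-empty cells.
--
--     Single row-major streaming pass (A scans column by column with a
--     two-pointer loop): one open-run state and one finished-run bucket per
--     column; runs close when the cell value changes, buckets are emitted
--     column by column at the end.
--     """
--     if not header_grid:
--         return
--
--     n_cols = len(header_grid[0])
--     # per column: (open value, open start row, bucket of finished runs)
--     state = [(None, 0, []) for _ in range(n_cols)]
--
--     for r, row in enumerate(header_grid):
--         for c in range(n_cols):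
--             v = row[c]
--             val, start, runs = state[c]
--             if v != val:
--                 if val and r - start > 1:
--                     runs.append((c, start, r - 1, val))
--                 state[c] = (v, r, runs)
--
--     n_rows = len(header_grid)
--     for c, (val, start, runs) in enumerate(state):
--         if val and n_rows - start > 1:
--             runs.append((c, start, n_rows - 1, val))
--         yield from runs
-- ===== Notes on version B (the rewrite author's own statement) =====
-- stated objective: alternative
-- what changed: Replaces A's column-major two-pointer scan with a single row-major streaming pass that keeps, per column, an open-run state plus a bucket of finished runs, closing a run whenever the cell value changes and emitting the buckets column by column at the end.
import Mathlib
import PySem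

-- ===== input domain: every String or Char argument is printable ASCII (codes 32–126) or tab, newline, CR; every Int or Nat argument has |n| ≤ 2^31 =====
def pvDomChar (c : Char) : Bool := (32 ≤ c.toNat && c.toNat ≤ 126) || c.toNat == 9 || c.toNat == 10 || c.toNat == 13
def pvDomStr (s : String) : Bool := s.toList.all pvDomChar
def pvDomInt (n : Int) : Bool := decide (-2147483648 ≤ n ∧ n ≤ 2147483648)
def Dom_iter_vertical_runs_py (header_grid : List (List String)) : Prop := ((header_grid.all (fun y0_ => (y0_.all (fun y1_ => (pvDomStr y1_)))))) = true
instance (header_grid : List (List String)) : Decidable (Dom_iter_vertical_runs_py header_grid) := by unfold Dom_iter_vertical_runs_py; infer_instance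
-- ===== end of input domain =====

-- B replaces A's column-major two-pointer scan by a single row-major streaming pass with,
-- per column, an open-run state and a bucket of finished runs, emitted column by column at
-- the end (alternative decomposition; return-value equivalence of the two generators).


-- ===== PORT A =====
-- cell access header_grid[r][c]: exact for r < n_rows, c < n_cols under Pre_ (no ragged rows)
def cellA (g : List (List String)) (r c : Nat) : String := (g.getD r []).getD c ""

-- inner while: advance n_row_idx_next_ while the cell equals the current value
def scanA (g : List (List String)) (nRows c : Nat) (v : String) (j : Nat) : Nat :=
  if j < nRows ∧ cellA g j c = v then scanA g nRows c v (j + 1) else j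
termination_by nRows - j
decreasing_by omega

theorem scanA_ge (g : List (List String)) (nRows c : Nat) (v : String) (j : Nat) :
    j ≤ scanA g nRows c v j := by
  rw [scanA]
  split
  · have := scanA_ge g nRows c v (j + 1); omega
  · exact le_refl _
termination_by nRows - j
decreasing_by omega

-- outer while over n_row_idx_start_
def colLoopA (g : List (List String)) (nRows c i : Nat) : List (Int × Int × Int × String) :=
  if h : i < nRows then
    if cellA g i c = "" then colLoopA g nRows c (i + 1)
    else
      (if scanA g nRows c (cellA g i c) (i + 1) - i > 1 then
        [((c : Int), (i : Int), ((scanA g nRows c (cellA g i c) (i + 1) : Nat) : Int) - 1,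
          cellA g i c)]
      else []) ++ colLoopA g nRows c (scanA g nRows c (cellA g i c) (i + 1))
  else []
termination_by nRows - i
decreasing_by
  · omega
  · have := scanA_ge g nRows c (cellA g i c) (i + 1); omega

def iter_vertical_runs_py (header_grid : List (List String)) : List (Int × Int × Int × String) :=
  if header_grid = [] then []
  else
    (List.range (header_grid.headD []).length).flatMap
      (fun c => colLoopA header_grid header_grid.length c 0)

-- ===== PORT B =====
-- one column's update for the cell v seen in row r: Python's
--   if v != val: (close the open run if truthy and long enough); state[c] = (v, r, runs)
def stepB (c r : Nat) (v : String)
    (s : Option String × Nat × List (Int × Int × Int × String)) :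
    Option String × Nat × List (Int × Int × Int × String) :=
  match s with
  | (val, start, runs) =>
    match val with
    | none => (some v, r, runs)
    | some w =>
      if v ≠ w then
        (some v, r,
          runs ++ (if w ≠ "" ∧ r - start > 1 then
            [((c : Int), (start : Int), ((r - 1 : Nat) : Int), w)] else []))
      else (some w, start, runs)

-- inner 'for c in range(n_cols)': walk the per-column state list with the column index
def rowStepB (r : Nat) (row : List String) :
    Nat → List (Option String × Nat × List (Int × Int × Int × String)) →
    List (Option String × Nat × List (Int × Int × Int × String))
  | _, [] => []
  | c, s :: rest => stepB c r (row.getD c "") s :: rowStepB r row (c + 1) rest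

-- outer 'for r, row in enumerate(header_grid)'
def rowsB : List (List String) → Nat →
    List (Option String × Nat × List (Int × Int × Int × String)) →
    List (Option String × Nat × List (Int × Int × Int × String))
  | [], _, st => st
  | row :: rest, r, st => rowsB rest (r + 1) (rowStepB r row 0 st)

-- final flush of one column's state: close the still-open run, then yield its bucket
def finishOne (c nRows : Nat)
    (s : Option String × Nat × List (Int × Int × Int × String)) :
    List (Int × Int × Int × String) :=
  match s with
  | (val, start, runs) =>
    runs ++ (match val with
      | some w => if w ≠ "" ∧ nRows - start > 1 then
          [((c : Int), (start : Int), ((nRows - 1 : Nat) : Int), w)] else []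
      | none => [])

-- final 'for c, (val, start, runs) in enumerate(state): … yield from runs'
def finishB (nRows : Nat) :
    Nat → List (Option String × Nat × List (Int × Int × Int × String)) →
    List (Int × Int × Int × String)
  | _, [] => []
  | c, s :: rest => finishOne c nRows s ++ finishB nRows (c + 1) rest

def iter_vertical_runs_py_alt (header_grid : List (List String)) :
    List (Int × Int × Int × String) :=
  if header_grid = [] then []
  else
    finishB header_grid.length 0
      (rowsB header_grid 0
        (List.replicate (header_grid.headD []).length
          ((none : Option String), 0, ([] : List (Int × Int × Int × String)))))

-- ===== PRECONDITION & SPEC =====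
-- Pre_ excludes ragged grids with a row shorter than row 0: there Python A raises IndexError
-- (and so does B); these are exactly the inputs on which A does not return.
def Pre_iter_vertical_runs_py (header_grid : List (List String)) : Prop :=
  ∀ row ∈ header_grid, (header_grid.headD []).length ≤ row.length
instance (header_grid : List (List String)) : Decidable (Pre_iter_vertical_runs_py header_grid) := by
  unfold Pre_iter_vertical_runs_py; infer_instance

def pvWitness_iter_vertical_runs_py : List (List String) :=
  [["a", ""], ["a", "x"], ["", "x"]]

def Spec_iter_vertical_runs_py (header_grid : List (List String)) (out : List (Int × Int × Int × String)) : Prop := out = iter_vertical_runs_py_alt header_grid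
instance (header_grid : List (List String)) (out : List (Int × Int × Int × String)) : Decidable (Spec_iter_vertical_runs_py header_grid out) := by unfold Spec_iter_vertical_runs_py; infer_instance

-- ===== CLAIM (what is proved, stated in full; the proofs are below) =====
def Claim_equal_iter_vertical_runs_py : Prop := ∀ (header_grid : List (List String)), Dom_iter_vertical_runs_py header_grid → Pre_iter_vertical_runs_py header_grid → Spec_iter_vertical_runs_py header_grid (iter_vertical_runs_py header_grid)

-- ===== LEMMAS AND PROOFS =====

-- A's cell access equals indexing into the materialised column (with defaults, on all inputs)
theorem cellA_eq_col (g : List (List String)) (c j : Nat) :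
    cellA g j c = (g.map (fun row => row.getD c "")).getD j "" := by
  unfold cellA
  by_cases h : j < g.length
  · have hlen : j < (g.map (fun row => row.getD c "")).length := by
      rw [List.length_map]; exact h
    rw [List.getD_eq_getElem _ _ hlen, List.getElem_map,
      show g.getD j [] = g[j] from List.getD_eq_getElem g [] h]
  · rw [List.getD_eq_default g [] (by omega),
      List.getD_eq_default (g.map (fun row => row.getD c "")) ""
        (by rw [List.length_map]; omega)]
    rfl

-- the inner while-scan counts the leading run of v in the column suffix
theorem scanA_eq (g : List (List String)) (c : Nat) (v : String) (j : Nat) :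
    scanA g g.length c v j =
      j + (((g.map (fun row => row.getD c "")).drop j).takeWhile (· == v)).length := by
  rw [scanA]
  by_cases h : j < g.length
  · have hlen : j < (g.map (fun row => row.getD c "")).length := by
      rw [List.length_map]; exact h
    have hget : (g.map (fun row => row.getD c ""))[j] = cellA g j c := by
      rw [cellA_eq_col, List.getD_eq_getElem _ _ hlen]
    rw [List.drop_eq_getElem_cons hlen, List.takeWhile_cons, hget]
    by_cases hv : cellA g j c = v
    · rw [if_pos ⟨h, hv⟩, if_pos (by simpa using hv), scanA_eq g c v (j + 1),
        List.length_cons]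
      omega
    · rw [if_neg (by tauto), if_neg (by simpa using hv), List.length_nil]
      omega
  · rw [if_neg (by tauto),
      List.drop_eq_nil_of_le (by rw [List.length_map]; omega), List.takeWhile_nil,
      List.length_nil]
    omega
termination_by g.length - j
decreasing_by omega

-- ----- single-column view of B -----

-- B's automaton restricted to one column: fold stepB over that column's cells
def colFold (c : Nat) :
    List String → Nat → (Option String × Nat × List (Int × Int × Int × String)) →
    Option String × Nat × List (Int × Int × Int × String)
  | [], _, s => s
  | v :: vs, r, s => colFold c vs (r + 1) (stepB c r v s)

-- what one column contributes to B's output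
def colF (c len : Nat) (cells : List String) (r : Nat)
    (s : Option String × Nat × List (Int × Int × Int × String)) :
    List (Int × Int × Int × String) :=
  finishOne c len (colFold c cells r s)

-- proof-side generalisation of rowsB over the starting column index
def rowsG (c0 : Nat) : List (List String) → Nat →
    List (Option String × Nat × List (Int × Int × Int × String)) →
    List (Option String × Nat × List (Int × Int × Int × String))
  | [], _, st => st
  | row :: rest, r, st => rowsG c0 rest (r + 1) (rowStepB r row c0 st)

theorem rowsB_eq_rowsG (rows : List (List String)) (r : Nat)
    (st : List (Option String × Nat × List (Int × Int × Int × String))) :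
    rowsB rows r st = rowsG 0 rows r st := by
  induction rows generalizing r st with
  | nil => rfl
  | cons row rest ih => simp [rowsB, rowsG, ih]

theorem rowsG_nil (c0 : Nat) (rows : List (List String)) (r : Nat) :
    rowsG c0 rows r [] = [] := by
  induction rows generalizing r with
  | nil => rfl
  | cons row rest ih => simp [rowsG, rowStepB, ih]

-- the state list evolves column-wise: head = single-column fold, tail = shifted rowsG
theorem rowsG_cons (c0 : Nat) (rows : List (List String)) (r : Nat)
    (s : Option String × Nat × List (Int × Int × Int × String))
    (rest : List (Option String × Nat × List (Int × Int × Int × String))) :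
    rowsG c0 rows r (s :: rest) =
      colFold c0 (rows.map (fun row => row.getD c0 "")) r s :: rowsG (c0 + 1) rows r rest := by
  induction rows generalizing r s rest with
  | nil => rfl
  | cons row rows' ih =>
    simp only [rowsG, rowStepB, List.map_cons, colFold, ih]

-- stepB only appends to the bucket; the new value/start do not depend on the bucket
theorem stepB_runs (c r : Nat) (v : String) (val : Option String) (start : Nat) :
    ∃ val' start' e, ∀ runs : List (Int × Int × Int × String),
      stepB c r v (val, start, runs) = (val', start', runs ++ e) := by
  cases val with
  | none => exact ⟨some v, r, [], fun runs => by simp [stepB]⟩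
  | some w =>
    by_cases hv : v ≠ w
    · exact ⟨some v, r,
        (if w ≠ "" ∧ r - start > 1 then
          [((c : Int), (start : Int), ((r - 1 : Nat) : Int), w)] else []),
        fun runs => by simp [stepB, hv]⟩
    · exact ⟨some w, start, [], fun runs => by simp [stepB, hv]⟩

theorem colF_runs (c len : Nat) (cells : List String) (r : Nat) (val : Option String)
    (start : Nat) (runs : List (Int × Int × Int × String)) :
    colF c len cells r (val, start, runs) = runs ++ colF c len cells r (val, start, []) := by
  induction cells generalizing r val start runs with
  | nil =>
    cases val <;> simp [colF, colFold, finishOne]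
  | cons v vs ih =>
    show colF c len vs (r + 1) (stepB c r v (val, start, runs)) = _
    obtain ⟨val', start', e, hs⟩ := stepB_runs c r v val start
    have hs0 : stepB c r v (val, start, []) = (val', start', e) := by
      simpa using hs []
    show _ = runs ++ colF c len vs (r + 1) (stepB c r v (val, start, []))
    rw [hs runs, hs0, ih (r + 1) val' start' (runs ++ e), ih (r + 1) val' start' e,
      List.append_assoc]

-- an open run of the empty value never emits: its start row is irrelevant
theorem colF_falsy (c len : Nat) (cells : List String) (r st st' : Nat) :
    colF c len cells r (some "", st, []) = colF c len cells r (some "", st', []) := by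
  induction cells generalizing r st st' with
  | nil => simp [colF, colFold, finishOne]
  | cons v vs ih =>
    by_cases hv : v = ""
    · subst hv
      show colF c len vs (r + 1) (stepB c r "" (some "", st, [])) = _
      have h1 : ∀ t, stepB c r "" (some "", t, ([] : List (Int × Int × Int × String))) =
          (some "", t, []) := by intro t; simp [stepB]
      rw [h1 st]
      show _ = colF c len vs (r + 1) (stepB c r "" (some "", st', []))
      rw [h1 st']
      exact ih (r + 1) st st'
    · show colF c len vs (r + 1) (stepB c r v (some "", st, [])) = _
      have h1 : ∀ t, stepB c r v (some "", t, ([] : List (Int × Int × Int × String))) =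
          (some v, r, []) := by intro t; simp [stepB, hv]
      rw [h1 st]
      show _ = colF c len vs (r + 1) (stepB c r v (some "", st', []))
      rw [h1 st']

-- while the cells keep the open value, the fold just walks past them
theorem colF_skip (c len : Nat) (cells : List String) (r st : Nat) (v : String) :
    colF c len cells r (some v, st, []) =
      colF c len (cells.drop (cells.takeWhile (· == v)).length)
        (r + (cells.takeWhile (· == v)).length) (some v, st, []) := by
  induction cells generalizing r with
  | nil => simp
  | cons w vs ih =>
    by_cases hw : w = v
    · subst hw
      show colF c len vs (r + 1) (stepB c r w (some w, st, [])) = _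
      have h1 : stepB c r w (some w, st, ([] : List (Int × Int × Int × String))) =
          (some w, st, []) := by simp [stepB]
      have hL : ((w :: vs).takeWhile (· == w)).length =
          (vs.takeWhile (· == w)).length + 1 := by
        simp
      rw [h1, ih (r + 1), hL,
        show r + ((vs.takeWhile (· == w)).length + 1) =
          r + 1 + (vs.takeWhile (· == w)).length from by omega,
        List.drop_succ_cons]
    · have hfw : ((w == v)) = false := by simpa using hw
      simp [hfw]

-- per-column equivalence: B's automaton from a fresh state equals A's two-pointer scan
theorem colEQ (g : List (List String)) (c : Nat) :
    ∀ k i, g.length - i ≤ k → i ≤ g.length →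
      (colF c g.length ((g.map (fun row => row.getD c "")).drop i) i
          ((none : Option String), 0, []) = colLoopA g g.length c i) ∧
      (∀ st, colF c g.length ((g.map (fun row => row.getD c "")).drop i) i
          (some "", st, []) = colLoopA g g.length c i) := by
  intro k
  induction k with
  | zero =>
    intro i hk hi
    have hi' : i = g.length := by omega
    subst hi'
    rw [List.drop_eq_nil_of_le (by simp)]
    rw [colLoopA, dif_neg (by omega)]
    constructor
    · simp [colF, colFold, finishOne]
    · intro st; simp [colF, colFold, finishOne]
  | succ k ihk =>
    intro i hk hi
    by_cases hlt : i < g.length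
    · -- expose the cell at row i
      have hlen : i < (g.map (fun row => row.getD c "")).length := by
        rw [List.length_map]; exact hlt
      have hget : (g.map (fun row => row.getD c ""))[i] = cellA g i c := by
        rw [cellA_eq_col, List.getD_eq_getElem _ _ hlen]
      set v := cellA g i c with hv
      have hdrop : (g.map (fun row => row.getD c "")).drop i =
          v :: (g.map (fun row => row.getD c "")).drop (i + 1) := by
        rw [List.drop_eq_getElem_cons hlen, hget]
      -- both admissible starting states step to the same successor state
      have hstep : ∀ s : Option String × Nat × List (Int × Int × Int × String),
          (s = ((none : Option String), 0, []) ∨ ∃ st, s = (some "", st, [])) →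
          colF c g.length ((g.map (fun row => row.getD c "")).drop i) i s =
            colF c g.length ((g.map (fun row => row.getD c "")).drop (i + 1)) (i + 1)
              (some v, i, []) := by
        intro s hs
        rw [hdrop]
        rcases hs with hs | ⟨st, hs⟩ <;> subst hs
        · show colF c g.length _ (i + 1) (stepB c i v ((none : Option String), 0, [])) = _
          rfl
        · show colF c g.length _ (i + 1) (stepB c i v (some "", st, [])) = _
          by_cases hve : v = ""
          · have h1 : stepB c i v (some "", st, ([] : List (Int × Int × Int × String))) =
                (some "", st, []) := by rw [hve]; simp [stepB]
            rw [h1, hve]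
            exact colF_falsy c g.length _ (i + 1) st i
          · have h1 : stepB c i v (some "", st, ([] : List (Int × Int × Int × String))) =
                (some v, i, []) := by simp [stepB, hve]
            rw [h1]
      -- the main body at row i
      have hmain : colF c g.length ((g.map (fun row => row.getD c "")).drop (i + 1)) (i + 1)
          (some v, i, []) = colLoopA g g.length c i := by
        rw [colLoopA, dif_pos hlt, ← hv]
        by_cases hve : v = ""
        · rw [if_pos hve, hve]
          exact (ihk (i + 1) (by omega) (by omega)).2 i
        · rw [if_neg hve]
          set tl := (g.map (fun row => row.getD c "")).drop (i + 1) with htl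
          set lead := (tl.takeWhile (· == v)).length with hlead
          have hscan : scanA g g.length c v (i + 1) = i + 1 + lead := by
            rw [scanA_eq]
          have hleadle : lead ≤ g.length - (i + 1) := by
            calc lead ≤ tl.length := (List.takeWhile_sublist _).length_le
            _ = g.length - (i + 1) := by rw [htl, List.length_drop, List.length_map]
          set j := i + 1 + lead with hj
          have hjle : j ≤ g.length := by omega
          rw [colF_skip, ← hlead, ← hj, hscan]
          have hdw : tl.drop lead = tl.dropWhile (· == v) := by
            conv_lhs => rw [← List.takeWhile_append_dropWhile (p := (· == v)) (l := tl)]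
            rw [hlead, List.drop_left]
          have hdd : tl.drop lead = (g.map (fun row => row.getD c "")).drop j := by
            rw [htl, List.drop_drop]
            try congr 1
            try omega
          rw [hdd]
          by_cases hjlt : j < g.length
          · have hjlen : j < (g.map (fun row => row.getD c "")).length := by
              rw [List.length_map]; exact hjlt
            have hgetj : (g.map (fun row => row.getD c ""))[j] = cellA g j c := by
              rw [cellA_eq_col, List.getD_eq_getElem _ _ hjlen]
            have hdropj : (g.map (fun row => row.getD c "")).drop j =
                cellA g j c :: (g.map (fun row => row.getD c "")).drop (j + 1) := by
              rw [List.drop_eq_getElem_cons hjlen, hgetj]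
            have hne : cellA g j c ≠ v := by
              have hnil : tl.dropWhile (· == v) ≠ [] := by
                rw [← hdw, hdd, hdropj]; simp
              have hhead := List.head_dropWhile_not (· == v) hnil
              have heq : (tl.dropWhile (· == v)).head hnil = cellA g j c := by
                simp only [← hdw, hdd, hdropj, List.head_cons]
              rw [heq] at hhead
              simpa using hhead
            -- B: one changed step closes the run and opens a new one at row j
            have hB : colF c g.length ((g.map (fun row => row.getD c "")).drop j) j
                (some v, i, []) =
                (if v ≠ "" ∧ j - i > 1 then
                    [((c : Int), (i : Int), ((j - 1 : Nat) : Int), v)] else []) ++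
                  colF c g.length ((g.map (fun row => row.getD c "")).drop (j + 1)) (j + 1)
                    (some (cellA g j c), j, []) := by
              rw [hdropj]
              show colF c g.length _ (j + 1) (stepB c j (cellA g j c) (some v, i, [])) = _
              have hst : stepB c j (cellA g j c) (some v, i, []) =
                  (some (cellA g j c), j,
                    (if v ≠ "" ∧ j - i > 1 then
                      [((c : Int), (i : Int), ((j - 1 : Nat) : Int), v)] else [])) := by
                simp [stepB, hne]
              rw [hst, colF_runs]
            -- A's tail via the induction hypothesis at j (fresh state)
            have hA : colF c g.length ((g.map (fun row => row.getD c "")).drop (j + 1))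
                (j + 1) (some (cellA g j c), j, []) = colLoopA g g.length c j := by
              have h0 := (ihk j (by omega) hjle).1
              rw [hdropj] at h0
              exact h0
            rw [hB, hA]
            congr 1
            by_cases hg2 : j - i > 1
            · rw [if_pos ⟨hve, hg2⟩, if_pos hg2]
              have h1 : ((j - 1 : Nat) : Int) = (j : Int) - 1 := by omega
              rw [h1]
            · rw [if_neg (by tauto), if_neg hg2]
          · have hnil : (g.map (fun row => row.getD c "")).drop j = [] := by
              apply List.drop_eq_nil_of_le
              rw [List.length_map]; omega
            rw [hnil]
            show finishOne c g.length (some v, i, []) = _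
            rw [colLoopA, dif_neg (by omega)]
            simp only [finishOne, List.nil_append, List.append_nil]
            by_cases hg2 : j - i > 1
            · rw [if_pos (⟨hve, by omega⟩ : v ≠ "" ∧ g.length - i > 1), if_pos hg2]
              have h1 : ((g.length - 1 : Nat) : Int) = (j : Int) - 1 := by omega
              rw [h1]
            · rw [if_neg (by intro h; have h2 := h.2; omega), if_neg hg2]
      constructor
      · rw [hstep ((none : Option String), 0, []) (Or.inl rfl), hmain]
      · intro st
        rw [hstep (some "", st, []) (Or.inr ⟨st, rfl⟩), hmain]
    · have hi' : i = g.length := by omega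
      subst hi'
      rw [List.drop_eq_nil_of_le (by simp)]
      rw [colLoopA, dif_neg (by omega)]
      constructor
      · simp [colF, colFold, finishOne]
      · intro st; simp [colF, colFold, finishOne]

-- assembling the columns: finishB over the evolved state list is A's per-column flatMap
theorem finishB_rowsG (g : List (List String)) :
    ∀ (n c0 : Nat),
      finishB g.length c0 (rowsG c0 g 0 (List.replicate n
        ((none : Option String), 0, ([] : List (Int × Int × Int × String))))) =
      (List.range' c0 n).flatMap (fun c => colLoopA g g.length c 0) := by
  intro n
  induction n with
  | zero => intro c0; simp [rowsG_nil, finishB]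
  | succ n ih =>
    intro c0
    rw [List.replicate_succ, rowsG_cons, List.range'_succ, List.flatMap_cons]
    show finishOne c0 g.length _ ++ finishB g.length (c0 + 1) _ = _
    rw [ih (c0 + 1)]
    congr 1
    have h0 := (colEQ g c0 g.length 0 (by omega) (by omega)).1
    rw [List.drop_zero] at h0
    exact h0

-- ===== VERDICT (by name: the statement is the Claim_ definition above) =====
theorem iter_vertical_runs_py_spec : Claim_equal_iter_vertical_runs_py := by
  intro g _ _
  unfold Spec_iter_vertical_runs_py iter_vertical_runs_py iter_vertical_runs_py_alt
  by_cases hg : g = []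
  · subst hg; rfl
  · rw [if_neg hg, if_neg hg, rowsB_eq_rowsG, finishB_rowsG, List.range_eq_range']
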